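-- pv_equiv track=rewrite | github.com/Arsen1302/Code-copy-detector | TestData/solutions/problem_1584_5.py | solution_1584_5
-- ===== SOURCE A (Python) =====
-- from typing import List
--
-- def solution_1584_5(nums: List[int], k: int) -> int:
--     ans = 1
--
--     nums = list(set(nums))
--     nums.sort()
--
--     newNums = []
--     newNums.append(nums[0])
--     nums.pop(0)
--     i = 1
--
--     while len(nums) >= 1:
--         if nums[0] <= newNums[ans - 1] + k:
--             nums.pop(0)
--         else:
--             ans += 1
--             newNums.append(nums[0])
--             nums.pop(0)
--
--     return ans
-- ===== SOURCE B (Python) =====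
-- from typing import List
--
-- def _first_greater(arr: List[int], x: int) -> int:
--     # index of the first element of sorted arr strictly greater than x (len(arr) if none)
--     lo, hi = 0, len(arr)
--     while lo < hi:
--         mid = (lo + hi) // 2
--         if arr[mid] <= x:
--             lo = mid + 1
--         else:
--             hi = mid
--     return lo
--
-- def solution_1584_5(nums: List[int], k: int) -> int:
--     s = sorted(set(nums))
--     anchor = s[0]
--     count = 1
--     rest = s[1:]
--     while True:
--         j = _first_greater(rest, anchor + k)
--         if j >= len(rest):
--             return count
--         anchor = rest[j]
--         rest = rest[j + 1:]
--         count += 1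
-- ===== Notes on version B (the rewrite author's own statement) =====
-- stated objective: faster
-- what changed: Replaces A's element-by-element scan that pops the front of the list at every step and keeps a growing anchor list with binary-search jumps from one group anchor to the next on the sorted deduplicated list, keeping only a scalar anchor and count.
import Mathlib
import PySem

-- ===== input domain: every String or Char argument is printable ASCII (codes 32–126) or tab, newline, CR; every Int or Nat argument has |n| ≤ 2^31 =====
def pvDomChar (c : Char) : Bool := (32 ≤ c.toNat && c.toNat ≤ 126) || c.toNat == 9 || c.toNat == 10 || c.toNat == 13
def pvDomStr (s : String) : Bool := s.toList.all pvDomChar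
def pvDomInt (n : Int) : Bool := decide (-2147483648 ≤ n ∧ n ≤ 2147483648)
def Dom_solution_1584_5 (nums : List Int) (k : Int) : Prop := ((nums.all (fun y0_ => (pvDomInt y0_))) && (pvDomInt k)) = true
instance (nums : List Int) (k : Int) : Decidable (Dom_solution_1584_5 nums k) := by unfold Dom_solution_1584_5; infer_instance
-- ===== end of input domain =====

-- B replaces A's linear scan with O(n)-per-step pop(0)s by binary-search jumps between
-- group anchors on the sorted deduplicated list (faster only if a timing run confirms it).
-- Both programs raise IndexError on an empty list; Pre_ excludes that.

-- ===== PORT A =====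
-- the while-loop of A: nums is the remaining list, newNums the anchors, ans the count;
-- newNums[ans - 1] is ported as pyGetD (in range throughout: ans = len(newNums), newNums ≠ [])
def loopA (k : Int) (nums newNums : List Int) (ans : Int) : Int :=
  match nums with
  | [] => ans
  | x :: rest =>
    if x ≤ PySem.List.pyGetD newNums (ans - 1) 0 + k then
      loopA k rest newNums ans
    else
      loopA k rest (newNums ++ [x]) (ans + 1)

def solution_1584_5 (nums : List Int) (k : Int) : Int :=
  let s := PySem.List.sorted (PySem.Set.ofList nums) (fun x => x) false
  match s with
  | [] => 0   -- Python raises IndexError at nums[0] here; excluded by Pre_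
  | x :: rest => loopA k rest [x] 1

-- ===== PORT B =====
-- _first_greater's while-loop (arr[mid] ported as pyGetD; mid < len(arr) whenever read)
def fgLoop (arr : List Int) (x : Int) (lo hi : Nat) : Nat :=
  if _h : lo < hi then
    let mid := (lo + hi) / 2
    if PySem.List.pyGetD arr (mid : Int) 0 ≤ x then fgLoop arr x (mid + 1) hi
    else fgLoop arr x lo mid
  else lo
termination_by hi - lo
decreasing_by all_goals omega

def firstGreater (arr : List Int) (x : Int) : Nat := fgLoop arr x 0 arr.length

-- the `while True` loop of B
def loopB (k : Int) (anchor : Int) (count : Int) (rest : List Int) : Int :=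
  let j := firstGreater rest (anchor + k)
  if _h : rest.length ≤ j then count
  else
    loopB k (PySem.List.pyGetD rest (j : Int) 0) (count + 1)
      (PySem.List.slice rest (some ((j + 1 : Nat) : Int)) none)
termination_by rest.length
decreasing_by simp only [PySem.List.slice_from_natCast, List.length_drop]; omega

def solution_1584_5_alt (nums : List Int) (k : Int) : Int :=
  let s := PySem.List.sorted (PySem.Set.ofList nums) (fun x => x) false
  match s with
  | [] => 0   -- Python raises IndexError at s[0] here; excluded by Pre_
  | x :: rest => loopB k x 1 rest

-- ===== PRECONDITION & SPEC =====
-- A raises IndexError (nums[0] after dedup) exactly when nums = []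
def Pre_solution_1584_5 (nums : List Int) (k : Int) : Prop := nums ≠ []
instance (nums : List Int) (k : Int) : Decidable (Pre_solution_1584_5 nums k) := by unfold Pre_solution_1584_5; infer_instance
def pvWitness_solution_1584_5 : List Int × Int := ([1, 5, 3, 5], 2)

def Spec_solution_1584_5 (nums : List Int) (k : Int) (out : Int) : Prop := out = solution_1584_5_alt nums k
instance (nums : List Int) (k : Int) (out : Int) : Decidable (Spec_solution_1584_5 nums k out) := by unfold Spec_solution_1584_5; infer_instance

-- ===== CLAIM (what is proved, stated in full; the proofs are below) =====
def Claim_equal_solution_1584_5 : Prop := ∀ (nums : List Int) (k : Int), Dom_solution_1584_5 nums k → Pre_solution_1584_5 nums k → Spec_solution_1584_5 nums k (solution_1584_5 nums k)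

-- ===== LEMMAS AND PROOFS =====

-- scalar abstraction of A's loop: only the last anchor matters
def gloop (k : Int) (l : List Int) (a c : Int) : Int :=
  match l with
  | [] => c
  | x :: r => if x ≤ a + k then gloop k r a c else gloop k r x (c + 1)

lemma loopA_eq_gloop (k : Int) : ∀ (l newNums : List Int) (h : newNums ≠ []),
    loopA k l newNums (newNums.length : Int) = gloop k l (newNums.getLast h) ((newNums.length : Int)) := by
  intro l
  induction l with
  | nil => intro newNums h; simp [loopA, gloop]
  | cons x r ih =>
    intro newNums h
    have hl : 1 ≤ newNums.length := (List.length_pos_iff).mpr h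
    have hidx : PySem.List.pyGetD newNums ((newNums.length : Int) - 1) 0 = newNums.getLast h := by
      have e : ((newNums.length : Int) - 1) = ((newNums.length - 1 : Nat) : Int) := by omega
      rw [e, PySem.List.pyGetD_natCast, List.getD_eq_getElem _ _ (by omega),
        List.getLast_eq_getElem]
    rw [loopA, hidx]
    by_cases hc : x ≤ newNums.getLast h + k
    · rw [if_pos hc, gloop, if_pos hc, ih newNums h]
    · rw [if_neg hc, gloop, if_neg hc]
      have h2 : (newNums ++ [x]) ≠ [] := by simp
      have := ih (newNums ++ [x]) h2
      rw [List.getLast_append_singleton] at this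
      have e : (((newNums ++ [x]).length : Nat) : Int) = (newNums.length : Int) + 1 := by
        simp
      rw [e] at this
      exact this

lemma fgLoop_stop (arr : List Int) (x : Int) (lo hi : Nat) (h : ¬ lo < hi) :
    fgLoop arr x lo hi = lo := by
  rw [fgLoop]; simp [h]

lemma fgLoop_step (arr : List Int) (x : Int) (lo hi : Nat) (h : lo < hi) :
    fgLoop arr x lo hi =
      if PySem.List.pyGetD arr (((lo + hi) / 2 : Nat) : Int) 0 ≤ x then
        fgLoop arr x ((lo + hi) / 2 + 1) hi
      else fgLoop arr x lo ((lo + hi) / 2) := by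
  rw [fgLoop]; simp [h]

lemma fgLoop_spec (arr : List Int) (x : Int) (hs : arr.Pairwise (· ≤ ·)) :
    ∀ lo hi, lo ≤ hi → hi ≤ arr.length →
    (∀ i (h : i < arr.length), i < lo → arr[i] ≤ x) →
    (∀ i (h : i < arr.length), hi ≤ i → x < arr[i]) →
    (∀ i (h : i < arr.length), i < fgLoop arr x lo hi → arr[i] ≤ x) ∧
    (∀ i (h : i < arr.length), fgLoop arr x lo hi ≤ i → x < arr[i]) := by
  intro lo hi
  induction lo, hi using fgLoop.induct arr x with
  | case1 lo hi hlt mid hmid ih =>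
    intro _ hhi hL hR
    have hmlt : mid < arr.length := by omega
    have hm : PySem.List.pyGetD arr (mid : Int) 0 = arr[mid] := by
      rw [PySem.List.pyGetD_natCast, List.getD_eq_getElem _ _ hmlt]
    rw [hm] at hmid
    rw [fgLoop_step arr x lo hi hlt, if_pos (by rw [hm]; exact hmid)]
    refine ih (by omega) hhi ?_ hR
    intro i hi2 hilt
    rcases Nat.lt_or_ge i mid with h' | h'
    · exact le_trans (List.pairwise_iff_getElem.mp hs i mid hi2 hmlt h') hmid
    · have : i = mid := by omega
      subst this; exact hmid
  | case2 lo hi hlt mid hmid ih =>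
    intro _ hhi hL hR
    have hmlt : mid < arr.length := by omega
    have hm : PySem.List.pyGetD arr (mid : Int) 0 = arr[mid] := by
      rw [PySem.List.pyGetD_natCast, List.getD_eq_getElem _ _ hmlt]
    rw [hm] at hmid
    rw [fgLoop_step arr x lo hi hlt, if_neg (by rw [hm]; exact hmid)]
    refine ih (by omega) (by omega) hL ?_
    intro i hi2 hile
    rcases Nat.lt_or_ge mid i with h' | h'
    · exact lt_of_lt_of_le (lt_of_not_ge hmid) (List.pairwise_iff_getElem.mp hs mid i hmlt hi2 h')
    · have : i = mid := by omega
      subst this; exact lt_of_not_ge hmid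
  | case3 lo hi hnlt =>
    intro hlohi _ hL hR
    rw [fgLoop_stop arr x lo hi hnlt]
    exact ⟨hL, fun i h hle => hR i h (by omega)⟩

lemma gloop_skip (k : Int) : ∀ (j : Nat) (l : List Int) (a c : Int),
    (∀ i (h : i < l.length), i < j → l[i] ≤ a + k) →
    gloop k l a c = gloop k (l.drop j) a c := by
  intro j
  induction j with
  | zero => intro l a c _; simp
  | succ j ih =>
    intro l a c hle
    cases l with
    | nil => simp
    | cons x r =>
      have hx : x ≤ a + k := hle 0 (by simp) (by omega)
      rw [gloop, if_pos hx, List.drop_succ_cons]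
      exact ih r a c (fun i h hi => hle (i + 1) (by simpa using h) (by omega))

lemma loopB_eq_gloop (k : Int) : ∀ (n : Nat) (l : List Int), l.length ≤ n →
    l.Pairwise (· ≤ ·) → ∀ a c, loopB k a c l = gloop k l a c := by
  intro n
  induction n with
  | zero =>
    intro l hlen _ a c
    have : l = [] := List.eq_nil_of_length_eq_zero (by omega)
    subst this
    rw [loopB]
    simp [firstGreater, fgLoop, gloop]
  | succ n ih =>
    intro l hlen hs a c
    obtain ⟨hle, hgt⟩ := fgLoop_spec l (a + k) hs 0 l.length (Nat.zero_le _) (le_refl _)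
      (fun i h hi => absurd hi (Nat.not_lt_zero i)) (fun i h hi => absurd h (by omega))
    rw [loopB]
    simp only [firstGreater]
    by_cases hcase : l.length ≤ fgLoop l (a + k) 0 l.length
    · rw [dif_pos hcase]
      rw [gloop_skip k l.length l a c (fun i h _ => hle i h (by omega)), List.drop_length, gloop]
    · rw [dif_neg hcase]
      set j := fgLoop l (a + k) 0 l.length with hj
      have hjlt : j < l.length := by omega
      have hget : PySem.List.pyGetD l (j : Int) 0 = l[j] := by
        rw [PySem.List.pyGetD_natCast, List.getD_eq_getElem _ _ hjlt]
      rw [hget, PySem.List.slice_from_natCast]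
      rw [ih (l.drop (j + 1)) (by simp; omega) hs.drop l[j] (c + 1)]
      rw [gloop_skip k j l a c (fun i h hi => hle i h hi),
        List.drop_eq_getElem_cons hjlt, gloop, if_neg (not_le.mpr (hgt j hjlt (le_refl j)))]

-- ===== VERDICT (by name: the statement is the Claim_ definition above) =====
theorem solution_1584_5_spec : Claim_equal_solution_1584_5 := by
  intro nums k _ hpre
  unfold Spec_solution_1584_5 solution_1584_5 solution_1584_5_alt
  have hpair := PySem.List.sorted_ofList_pairwise_lt (xs := nums)
  cases hcs : PySem.List.sorted (PySem.Set.ofList nums) (fun x => x) false with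
  | nil =>
    exact absurd ((PySem.List.sorted_eq_nil_iff _ _ _).mp hcs) (by
      intro h0
      obtain ⟨x, t, rfl⟩ := List.exists_cons_of_ne_nil hpre
      have : x ∈ PySem.Set.ofList (x :: t) := (PySem.Set.mem_ofList _ x).mpr (by simp)
      simp [h0] at this)
  | cons x rest =>
    rw [hcs] at hpair
    show loopA k rest [x] 1 = loopB k x 1 rest
    have hA : loopA k rest [x] ((([x] : List Int).length : Int)) =
        gloop k rest (([x] : List Int).getLast (by simp)) ((([x] : List Int).length : Int)) :=
      loopA_eq_gloop k rest [x] (by simp)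
    norm_num at hA
    rw [hA, loopB_eq_gloop k rest.length rest (le_refl _)
      ((List.pairwise_cons.mp hpair).2.imp le_of_lt) x 1]
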